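-- pv_equiv track=rewrite | github.com/tsato-code/python_script | machinelearning/make_orthogonal_array.py | make_orthogonal_array
-- ===== SOURCE A (Python) =====
-- import copy
--
-- def make_orthogonal_array(size=16):
--     """ 直交表の生成 """
--     A = [[0],[1]]
--     while len(A) < size:
--         newA = []
--         for a in A:
--             newA.append(copy.deepcopy(a))
--             newA.append(copy.deepcopy(a))
--         for i, a in enumerate(newA):
--             if i%2==0:
--                 a.append(0)
--             else:
--                 a.append(1)
--         for a in newA:
--             a += [i^a[-1] for i in a[:-1]]
--         A = newA
--     return A
-- ===== SOURCE B (Python) =====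
-- def _build(k):
--     if k == 1:
--         return [[0], [1]]
--     prev = _build(k - 1)
--     out = []
--     for row in prev:
--         out.append(row + [0] + row)
--         out.append(row + [1] + [x ^ 1 for x in row])
--     return out
--
-- def make_orthogonal_array(size=16):
--     k = 1
--     while 2 ** k < size:
--         k += 1
--     return _build(k)
-- ===== Notes on version B (the rewrite author's own statement) =====
-- stated objective: alternative
-- what changed: Replaces the in-place mutating while-loop (deepcopy rows, append parity bits, extend each row with xor of its last element) by a recursive divide-and-conquer builder on the smallest sufficient exponent, emitting each doubled pair of fresh rows directly.
import Mathlib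
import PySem

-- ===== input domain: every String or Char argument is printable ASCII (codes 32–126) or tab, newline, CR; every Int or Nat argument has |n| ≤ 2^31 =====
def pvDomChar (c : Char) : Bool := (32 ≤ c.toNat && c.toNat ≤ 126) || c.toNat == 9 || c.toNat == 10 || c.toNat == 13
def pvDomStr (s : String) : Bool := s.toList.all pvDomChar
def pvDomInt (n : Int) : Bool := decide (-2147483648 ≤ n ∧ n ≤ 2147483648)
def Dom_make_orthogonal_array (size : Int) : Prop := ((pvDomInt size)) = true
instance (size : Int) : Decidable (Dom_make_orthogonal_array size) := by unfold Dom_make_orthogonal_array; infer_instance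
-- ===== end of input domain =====

-- B replaces A's in-place mutating doubling loop (with deepcopy) by a recursive divide-and-conquer
-- builder on the smallest sufficient exponent, building fresh rows directly.

-- ===== PORT A =====
-- first inner loop: newA.append(deepcopy(a)); newA.append(deepcopy(a))
def pvDupRows : List (List Int) → List (List Int)
  | [] => []
  | a :: rest => a :: a :: pvDupRows rest

-- second inner loop: even index appends 0, odd appends 1 (i is the running index)
def pvAddBits (i : Nat) : List (List Int) → List (List Int)
  | [] => []
  | a :: rest => (a ++ [if i % 2 = 0 then (0 : Int) else 1]) :: pvAddBits (i + 1) rest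

-- third inner loop body: a += [i ^ a[-1] for i in a[:-1]]  (a is always nonempty here;
-- getLast?/dropLast are exact for Python's a[-1]/a[:-1] on nonempty lists)
def pvExtendRow (a : List Int) : List Int :=
  match a.getLast? with
  | some b => a ++ a.dropLast.map (fun x => PySem.Int.bxor x b)
  | none => a

def pvStepA (A : List (List Int)) : List (List Int) :=
  (pvAddBits 0 (pvDupRows A)).map pvExtendRow

theorem pvDupRows_length (A : List (List Int)) : (pvDupRows A).length = 2 * A.length := by
  induction A with
  | nil => simp [pvDupRows]
  | cons a rest ih => simp [pvDupRows, ih]; omega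

theorem pvAddBits_length (i : Nat) (A : List (List Int)) :
    (pvAddBits i A).length = A.length := by
  induction A generalizing i with
  | nil => simp [pvAddBits]
  | cons a rest ih => simp [pvAddBits, ih]

theorem pvStepA_length (A : List (List Int)) : (pvStepA A).length = 2 * A.length := by
  simp [pvStepA, pvAddBits_length, pvDupRows_length]

-- the while loop: while len(A) < size: A = step(A)
-- (the 'A ≠ []' guard only ensures totality; the loop is only ever entered with A = [[0],[1]])
def pvLoopA (size : Int) (A : List (List Int)) : List (List Int) :=
  if h : (A.length : Int) < size ∧ A ≠ [] then pvLoopA size (pvStepA A) else A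
termination_by (size - A.length).toNat
decreasing_by
  have h1 : (pvStepA A).length = 2 * A.length := pvStepA_length A
  have h2 : 0 < A.length := List.length_pos_of_ne_nil h.2
  omega

def make_orthogonal_array (size : Int) : List (List Int) :=
  pvLoopA size [[0], [1]]

-- ===== PORT B =====
def pvBuild : Nat → List (List Int)
  | 0 => [[0], [1]]
  | 1 => [[0], [1]]
  | k + 2 =>
    (pvBuild (k + 1)).flatMap
      (fun row => [row ++ [0] ++ row, row ++ [1] ++ row.map (fun x => PySem.Int.bxor x 1)])

-- while 2 ** k < size: k += 1
def pvFindK (size : Int) (k : Nat) : Nat :=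
  if h : (2 : Int) ^ k < size then pvFindK size (k + 1) else k
termination_by (size - 2 ^ k).toNat
decreasing_by
  have h1 : (0 : Int) < 2 ^ k := by positivity
  have h2 : (2 : Int) ^ (k + 1) = 2 * 2 ^ k := by ring
  omega

def make_orthogonal_array_alt (size : Int) : List (List Int) :=
  pvBuild (pvFindK size 1)

-- ===== PRECONDITION & SPEC =====
def Spec_make_orthogonal_array (size : Int) (out : List (List Int)) : Prop := out = make_orthogonal_array_alt size
instance (size : Int) (out : List (List Int)) : Decidable (Spec_make_orthogonal_array size out) := by unfold Spec_make_orthogonal_array; infer_instance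

-- ===== CLAIM (what is proved, stated in full; the proofs are below) =====
def Claim_equal_make_orthogonal_array : Prop := ∀ (size : Int), Dom_make_orthogonal_array size → Spec_make_orthogonal_array size (make_orthogonal_array size)

-- ===== LEMMAS AND PROOFS =====

theorem flatMap2_length (l : List (List Int)) (f g : List Int → List Int) :
    (l.flatMap (fun row => [f row, g row])).length = 2 * l.length := by
  induction l with
  | nil => simp
  | cons a rest ih => simp [ih]; omega

theorem pvBuild_length (k : Nat) : (pvBuild (k + 1)).length = 2 ^ (k + 1) := by
  induction k with
  | zero => simp [pvBuild]
  | succ n ih =>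
    show (pvBuild (n + 2)).length = 2 ^ (n + 2)
    rw [pvBuild, flatMap2_length, ih]
    ring

theorem pvBuild_ne_nil (k : Nat) (hk : 1 ≤ k) : pvBuild k ≠ [] := by
  intro h
  have h1 := pvBuild_length (k - 1)
  rw [Nat.sub_add_cancel hk, h] at h1
  simp at h1
  have : 0 < 2 ^ k := Nat.pow_pos (by norm_num)
  omega

theorem pvExtendRow_concat (a : List Int) (b : Int) :
    pvExtendRow (a ++ [b]) = a ++ [b] ++ a.map (fun x => PySem.Int.bxor x b) := by
  simp [pvExtendRow]

theorem pvStep_flatMap (A : List (List Int)) (i : Nat) (hi : i % 2 = 0) :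
    (pvAddBits i (pvDupRows A)).map pvExtendRow =
      A.flatMap (fun row => [row ++ [0] ++ row, row ++ [1] ++ row.map (fun x => PySem.Int.bxor x 1)]) := by
  induction A generalizing i with
  | nil => simp [pvDupRows, pvAddBits]
  | cons a rest ih =>
    have h1 : (i + 1) % 2 = 1 := by omega
    have h2 : (i + 2) % 2 = 0 := by omega
    simp only [pvDupRows, pvAddBits, hi, h1, List.map_cons, List.flatMap_cons,
      if_true, show ((1 : Nat) = 0) = False by simp, if_false]
    rw [pvExtendRow_concat, pvExtendRow_concat, show i + 1 + 1 = i + 2 from rfl, ih (i + 2) h2]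
    simp [PySem.Int.bxor_zero]

theorem pvStepA_build (j : Nat) (hj : 1 ≤ j) : pvStepA (pvBuild j) = pvBuild (j + 1) := by
  obtain ⟨m, rfl⟩ : ∃ m, j = m + 1 := ⟨j - 1, (Nat.sub_add_cancel hj).symm⟩
  show pvStepA (pvBuild (m + 1)) = pvBuild (m + 2)
  rw [pvBuild]
  exact pvStep_flatMap (pvBuild (m + 1)) 0 rfl

theorem pvBuild_len_int (j : Nat) (hj : 1 ≤ j) :
    ((pvBuild j).length : Int) = 2 ^ j := by
  obtain ⟨m, rfl⟩ : ∃ m, j = m + 1 := ⟨j - 1, (Nat.sub_add_cancel hj).symm⟩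
  rw [pvBuild_length]
  push_cast
  ring

theorem pvLoop_build_aux (size : Int) (n : Nat) :
    ∀ (j : Nat), 1 ≤ j → (size - 2 ^ j).toNat ≤ n →
      pvLoopA size (pvBuild j) = pvBuild (pvFindK size j) := by
  induction n with
  | zero =>
    intro j hj hle
    have hlen := pvBuild_len_int j hj
    have hpos : (0 : Int) < 2 ^ j := by positivity
    have hstop : ¬ ((2 : Int) ^ j < size) := by omega
    rw [pvLoopA, pvFindK, dif_neg (by rw [hlen]; exact fun hc => hstop hc.1), dif_neg hstop]
  | succ n ih =>
    intro j hj hle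
    have hlen := pvBuild_len_int j hj
    have hpos : (0 : Int) < 2 ^ j := by positivity
    by_cases hlt : (2 : Int) ^ j < size
    · rw [pvLoopA, pvFindK, dif_pos (by rw [hlen]; exact ⟨hlt, pvBuild_ne_nil j hj⟩), dif_pos hlt]
      rw [pvStepA_build j hj]
      apply ih (j + 1) (by omega)
      have h2 : (2 : Int) ^ (j + 1) = 2 * 2 ^ j := by ring
      omega
    · rw [pvLoopA, pvFindK, dif_neg (by rw [hlen]; exact fun hc => hlt hc.1), dif_neg hlt]

theorem pvLoop_build (size : Int) (j : Nat) (hj : 1 ≤ j) :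
    pvLoopA size (pvBuild j) = pvBuild (pvFindK size j) :=
  pvLoop_build_aux size (size - 2 ^ j).toNat j hj le_rfl

-- ===== VERDICT (by name: the statement is the Claim_ definition above) =====
theorem make_orthogonal_array_spec : Claim_equal_make_orthogonal_array := by
  intro size _
  unfold Spec_make_orthogonal_array make_orthogonal_array make_orthogonal_array_alt
  have : ([[0], [1]] : List (List Int)) = pvBuild 1 := by simp [pvBuild]
  rw [this, pvLoop_build size 1 le_rfl]
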